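-- pv_equiv track=rewrite | github.com/DataInMotionEnterprise/DIME-Documentation.BBS | fix-md-spacing.py | fix_line_space
-- ===== SOURCE A (Python) =====
-- def fix_line_space(line, curr_pos, ref_pos, target_len):
--     """Pass 2: shift │ by inserting/removing spaces only."""
--     if len(curr_pos) != len(ref_pos):
--         return None
--     chars = list(line)
--     offset = 0
--     for curr, ref in zip(curr_pos, ref_pos):
--         actual = curr + offset
--         diff = ref - actual
--         if diff == 0:
--             continue
--         if diff > 0:
--             for _ in range(diff):
--                 chars.insert(actual, ' ')
--             offset += diff
--         else:
--             remove = abs(diff)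
--             start = actual - remove
--             if start < 0 or not all(chars[start + j] == ' ' for j in range(remove)):
--                 return None
--             del chars[start:actual]
--             offset += diff
--     result = ''.join(chars)
--     if len(result) < target_len:
--         result = result[:-1] + ' ' * (target_len - len(result)) + result[-1]
--     elif len(result) > target_len:
--         excess = len(result) - target_len
--         idx = len(result) - 2
--         while excess > 0 and idx > 0:
--             if result[idx] == ' ':
--                 result = result[:idx] + result[idx + 1:]
--                 excess -= 1
--             idx -= 1
--         if excess > 0:
--             return None
--     return result if len(result) == target_len else None
-- ===== SOURCE B (Python) =====
-- def fix_line_space(line, curr_pos, ref_pos, target_len):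
--     """Pass 2 (rewrite): same result via slice splicing and a one-shot interior-space trim."""
--     if len(curr_pos) != len(ref_pos):
--         return None
--     s = line
--     delta = 0
--     for curr, ref in zip(curr_pos, ref_pos):
--         a = curr + delta
--         d = ref - a
--         if d > 0:
--             s = s[:a] + ' ' * d + s[a:]
--         elif d < 0:
--             if ref < 0 or s[ref:a] != ' ' * (-d):
--                 return None
--             s = s[:ref] + s[a:]
--         delta = ref - curr
--     L = len(s)
--     if L < target_len:
--         return s[:-1] + ' ' * (target_len - L) + s[-1:]
--     if L > target_len:
--         excess = L - target_len
--         spaces = [i for i, c in enumerate(s) if c == ' ' and 0 < i < L - 1]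
--         if len(spaces) < excess:
--             return None
--         drop = set(spaces[len(spaces) - excess:])
--         return ''.join(c for i, c in enumerate(s) if i not in drop)
--     return s
-- ===== Notes on version B (the rewrite author's own statement) =====
-- stated objective: alternative
-- what changed: B replaces A's per-character chars.insert loop by one slice splice per marker, the index-by-index space scan by a slice comparison, and A's trim loop (which rebuilds the string for every removed space) by collecting the interior space indices once, dropping the last `excess` of them and re-joining in a single pass.
-- outside the precondition, e.g. on fix_line_space('xy', [5], [0], 2): A returns None, B returns None; on fix_line_space('x', [0, 1], [5, 0], 3): A returns None, B returns None
import Mathlib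
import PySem

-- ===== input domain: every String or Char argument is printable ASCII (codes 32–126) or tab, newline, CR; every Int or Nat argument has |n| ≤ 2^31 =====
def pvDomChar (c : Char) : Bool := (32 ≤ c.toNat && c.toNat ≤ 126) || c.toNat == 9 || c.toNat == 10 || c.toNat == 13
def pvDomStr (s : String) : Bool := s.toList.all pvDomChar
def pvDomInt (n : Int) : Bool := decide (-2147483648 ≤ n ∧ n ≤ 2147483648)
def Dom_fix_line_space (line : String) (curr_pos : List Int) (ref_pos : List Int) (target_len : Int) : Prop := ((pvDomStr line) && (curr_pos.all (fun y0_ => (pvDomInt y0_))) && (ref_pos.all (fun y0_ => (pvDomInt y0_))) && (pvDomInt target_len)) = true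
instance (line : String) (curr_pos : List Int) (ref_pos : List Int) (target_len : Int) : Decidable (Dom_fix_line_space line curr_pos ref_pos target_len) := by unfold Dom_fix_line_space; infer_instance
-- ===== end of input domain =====

-- B replaces A's per-character inserts, indexed space scan and slice-rebuilding trim by slice
-- splicing and a one-shot collection of the interior space indices to delete (objective: alternative).


-- ===== PORT A =====
-- `for _ in range(diff): chars.insert(actual, ' ')`
def insRepA (chars : List Char) (pos : Int) : Nat → List Char
  | 0 => chars
  | k+1 => insRepA (PySem.List.insert chars pos ' ') pos k
-- the `for curr, ref in zip(curr_pos, ref_pos)` loop of A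
def loopA : List (Int × Int) → List Char → Int → Option (List Char)
  | [], chars, _ => some chars
  | (curr, ref) :: rest, chars, offset =>
    let actual := curr + offset
    let diff := ref - actual
    if diff = 0 then loopA rest chars offset
    else if 0 < diff then loopA rest (insRepA chars actual diff.toNat) (offset + diff)
    else
      let remove := -diff
      let start := actual - remove
      if start < 0 ∨ ¬ (((List.range remove.toNat).all fun j => PySem.List.pyGet? chars (start + (j : Int)) == some ' ') = true) then none
      else loopA rest (PySem.List.slice chars none (some start) ++ PySem.List.slice chars (some actual) none) (offset + diff)
-- the `while excess > 0 and idx > 0` trimming loop of A;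
-- `result[idx] == ' '` / `result[:idx] + result[idx+1:]` via pyGet? / slices
def trimA (result : List Char) (excess : Int) (idx : Int) : List Char × Int :=
  if h : 0 < excess ∧ 0 < idx then
    if PySem.List.pyGet? result idx == some ' ' then
      trimA (PySem.List.slice result none (some idx) ++ PySem.List.slice result (some (idx + 1)) none) (excess - 1) (idx - 1)
    else trimA result excess (idx - 1)
  else (result, excess)
termination_by idx.toNat
decreasing_by all_goals omega
-- `result[-1]` raises IndexError on an empty result (pyGet? = none there; excluded by Pre_)
def fix_line_space (line : String) (curr_pos : List Int) (ref_pos : List Int) (target_len : Int) : Option String :=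
  if curr_pos.length ≠ ref_pos.length then none
  else
    match loopA (curr_pos.zip ref_pos) line.toList 0 with
    | none => none
    | some chars =>
      let L : Int := chars.length
      let res? : Option (List Char) :=
        if L < target_len then
          (PySem.List.pyGet? chars (-1)).map fun c =>
            PySem.List.slice chars none (some (-1)) ++ List.replicate (target_len - L).toNat ' ' ++ [c]
        else if target_len < L then
          let p := trimA chars (L - target_len) (L - 2)
          if 0 < p.2 then none else some p.1
        else some chars
      res?.bind fun r => if (r.length : Int) = target_len then some (String.ofList r) else none

-- ===== PORT B =====
-- B's zip loop: one slice splice / slice comparison per marker; delta recomputed as ref - curr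
def loopB : List (Int × Int) → List Char → Int → Option (List Char)
  | [], s, _ => some s
  | (curr, ref) :: rest, s, delta =>
    let a := curr + delta
    let d := ref - a
    if 0 < d then
      loopB rest (PySem.List.slice s none (some a) ++ List.replicate d.toNat ' ' ++ PySem.List.slice s (some a) none) (ref - curr)
    else if d < 0 then
      if ref < 0 ∨ PySem.List.slice s (some ref) (some a) ≠ List.replicate (-d).toNat ' ' then none
      else loopB rest (PySem.List.slice s none (some ref) ++ PySem.List.slice s (some a) none) (ref - curr)
    else loopB rest s (ref - curr)
def fix_line_space_alt (line : String) (curr_pos : List Int) (ref_pos : List Int) (target_len : Int) : Option String :=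
  if curr_pos.length ≠ ref_pos.length then none
  else
    match loopB (curr_pos.zip ref_pos) line.toList 0 with
    | none => none
    | some s =>
      let L : Int := s.length
      if L < target_len then
        some (String.ofList (PySem.List.slice s none (some (-1)) ++ List.replicate (target_len - L).toNat ' ' ++ PySem.List.slice s (some (-1)) none))
      else if target_len < L then
        let excess := (L - target_len).toNat
        let spaces := ((PySem.List.enumerate s).filter fun p => p.2 == ' ' && decide (0 < p.1 ∧ p.1 < L - 1)).map (·.1)
        if spaces.length < excess then none
        else
          let drop := PySem.Set.ofList (spaces.drop (spaces.length - excess))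
          some (String.ofList (((PySem.List.enumerate s).filter fun p => !(PySem.Set.contains drop p.1)).map (·.2)))
      else some (String.ofList s)

-- ===== PRECONDITION & SPEC =====
def preDeltas (curr_pos ref_pos : List Int) : List Int := (curr_pos.zip ref_pos).map (fun p => p.2 - p.1)

-- Pre_ excludes a closed-form over-approximation of the inputs on which A raises IndexError:
-- a removal step aimed beyond the end of the line (A indexes chars past the list), and a run
-- whose final result is empty while target_len > 0 (A evaluates result[-1]); on the excluded
-- inputs where A still returns it returns None, and B returns None there as well (see cites).
def Pre_fix_line_space (line : String) (curr_pos : List Int) (ref_pos : List Int) (target_len : Int) : Prop :=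
  curr_pos.length = ref_pos.length →
    ((∀ i : Nat, i < (curr_pos.zip ref_pos).length →
        ¬((preDeltas curr_pos ref_pos).getD i 0 < (if i = 0 then 0 else (preDeltas curr_pos ref_pos).getD (i - 1) 0)
          ∧ 0 ≤ ref_pos.getD i 0 ∧ (line.toList.length : Int) < curr_pos.getD i 0))
     ∧ ¬(0 < target_len ∧ (line.toList.length : Int) + ((preDeltas curr_pos ref_pos).getLast?.getD 0) = 0))

instance (line : String) (curr_pos : List Int) (ref_pos : List Int) (target_len : Int) : Decidable (Pre_fix_line_space line curr_pos ref_pos target_len) := by unfold Pre_fix_line_space; infer_instance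

def pvWitness_fix_line_space : String × List Int × List Int × Int := ("a| b", [1], [3], 6)

def Spec_fix_line_space (line : String) (curr_pos : List Int) (ref_pos : List Int) (target_len : Int) (out : Option String) : Prop := out = fix_line_space_alt line curr_pos ref_pos target_len
instance (line : String) (curr_pos : List Int) (ref_pos : List Int) (target_len : Int) (out : Option String) : Decidable (Spec_fix_line_space line curr_pos ref_pos target_len out) := by unfold Spec_fix_line_space; infer_instance

-- ===== CLAIM (what is proved, stated in full; the proofs are below) =====
def Claim_equal_fix_line_space : Prop := ∀ (line : String) (curr_pos : List Int) (ref_pos : List Int) (target_len : Int), Dom_fix_line_space line curr_pos ref_pos target_len → Pre_fix_line_space line curr_pos ref_pos target_len → Spec_fix_line_space line curr_pos ref_pos target_len (fix_line_space line curr_pos ref_pos target_len)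

-- ===== LEMMAS AND PROOFS =====

lemma insert_eq_clamp (xs : List Char) (i : Int) (v : Char) :
    PySem.List.insert xs i v =
      xs.take (PySem.List.clampIdx xs.length i) ++ v :: xs.drop (PySem.List.clampIdx xs.length i) := by
  show (match PySem.List.sliceIndices xs.length (some i) none 1 with
    | (k, _, _) => List.take k.toNat xs ++ v :: List.drop k.toNat xs) = _
  simp only [PySem.List.sliceIndices]
  norm_num
  have : (if i < 0 then max (i + (xs.length : Int)) 0 else min i (xs.length : Int)).toNat
      = PySem.List.clampIdx xs.length i := by
    simp only [PySem.List.clampIdx]; split_ifs <;> omega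
  rw [this]

lemma clamp_mono (n : Nat) (a : Int) :
    PySem.List.clampIdx n a ≤ PySem.List.clampIdx (n + 1) a ∧
    PySem.List.clampIdx (n + 1) a ≤ PySem.List.clampIdx n a + 1 := by
  simp only [PySem.List.clampIdx]
  split_ifs <;> omega

lemma all_spaces_iff_take (t : List Char) (k : Nat) :
    (((List.range k).all fun j => t[j]? == some ' ') = true) ↔ t.take k = List.replicate k ' ' := by
  induction k generalizing t with
  | zero => simp
  | succ k ih =>
    rw [List.range_succ, List.all_append, List.take_add_one]
    simp only [List.all_cons, List.all_nil, Bool.and_true, Bool.and_eq_true, ih]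
    constructor
    · rintro ⟨h1, h2⟩
      simp only [beq_iff_eq] at h2
      rw [List.replicate_add, h1, h2]
      simp
    · intro h
      have hlen := congrArg List.length h
      simp at hlen
      have htl : t[k]?.toList.length ≤ 1 := by cases h' : t[k]? <;> simp [h']
      have hk : k ≤ t.length := by omega
      rw [List.replicate_add] at h
      have hl : (List.take k t).length = (List.replicate k ' ').length := by simp; omega
      obtain ⟨h1, h2⟩ := List.append_inj h hl
      refine ⟨h1, ?_⟩
      cases h' : t[k]? with
      | none => rw [h'] at h2; simp at h2
      | some c => rw [h'] at h2; simp at h2; simp [h2]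

lemma insRepA_block (a : Int) : ∀ (k m : Nat) (u v : List Char),
    u.length ≤ PySem.List.clampIdx (u.length + m + v.length) a →
    PySem.List.clampIdx (u.length + m + v.length) a ≤ u.length + m →
    insRepA (u ++ List.replicate m ' ' ++ v) a k = u ++ List.replicate (m + k) ' ' ++ v := by
  intro k
  induction k with
  | zero => intro m u v _ _; simp [insRepA]
  | succ k ih =>
    intro m u v h1 h2
    have hlen : (u ++ List.replicate m ' ' ++ v).length = u.length + m + v.length := by
      simp; omega
    set c := PySem.List.clampIdx (u.length + m + v.length) a with hc
    have hins : PySem.List.insert (u ++ List.replicate m ' ' ++ v) a ' '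
        = u ++ List.replicate (m + 1) ' ' ++ v := by
      rw [insert_eq_clamp, hlen, ← hc]
      rw [List.append_assoc, List.take_append, List.drop_append,
          List.take_append, List.drop_append, List.take_replicate, List.drop_replicate]
      rw [List.take_of_length_le (by omega), List.drop_eq_nil_of_le (by omega)]
      simp only [List.length_replicate]
      have e0 : c - u.length - m = 0 := by omega
      have e1 : min (c - u.length) m = c - u.length := by omega
      rw [e0, e1]
      simp only [List.take_zero, List.append_nil, List.nil_append]
      simp only [List.drop_zero, List.append_assoc, List.cons_append, List.nil_append]
      congr 1
      have h3 : ' ' :: (List.replicate (m - (c - u.length)) ' ' ++ v)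
           = List.replicate (m - (c - u.length) + 1) ' ' ++ v := by
        simp [List.replicate_succ]
      rw [h3, ← List.append_assoc, ← List.replicate_add,
          show c - u.length + (m - (c - u.length) + 1) = m + 1 from by omega]
    show insRepA (PySem.List.insert (u ++ List.replicate m ' ' ++ v) a ' ') a k = _
    rw [hins]
    have hmono := clamp_mono (u.length + m + v.length) a
    have hrw : u.length + (m + 1) + v.length = u.length + m + v.length + 1 := by omega
    rw [hc] at h1 h2
    have hb1 : u.length ≤ PySem.List.clampIdx (u.length + (m+1) + v.length) a := by
      rw [hrw]; omega
    have hb2 : PySem.List.clampIdx (u.length + (m+1) + v.length) a ≤ u.length + (m+1) := by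
      rw [hrw]; omega
    have := ih (m + 1) u v hb1 hb2
    rw [this, show m + 1 + k = m + (k + 1) from by omega]

lemma insRepA_eq_splice (s : List Char) (a : Int) (k : Nat) :
    insRepA s a k = PySem.List.slice s none (some a) ++ List.replicate k ' ' ++ PySem.List.slice s (some a) none := by
  have hc : PySem.List.clampIdx s.length a ≤ s.length := PySem.List.clampIdx_le _ _
  set c := PySem.List.clampIdx s.length a with hcdef
  have hs : s = s.take c ++ List.replicate 0 ' ' ++ s.drop c := by simp
  have hu : (s.take c).length = c := by simp; omega
  have hlen2 : (s.take c).length + 0 + (s.drop c).length = s.length := by simp; omega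
  have := insRepA_block a k 0 (s.take c) (s.drop c)
    (by rw [hlen2, ← hcdef, hu]) (by rw [hlen2, ← hcdef, hu]; omega)
  rw [← hs] at this
  rw [this]
  have h1 : PySem.List.slice s none (some a) = s.take c := by
    simp [PySem.List.slice, hcdef]
  have h2 : PySem.List.slice s (some a) none = s.drop c := by
    rw [PySem.List.slice_some_none]
  rw [h1, h2]
  simp

lemma all_spaces_iff_slice (s : List Char) (r a : Int) (hr : 0 ≤ r) (hra : r < a) :
    (((List.range (a - r).toNat).all fun j => PySem.List.pyGet? s (r + (j : Int)) == some ' ') = true) ↔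
      PySem.List.slice s (some r) (some a) = List.replicate (a - r).toNat ' ' := by
  have ha : 0 ≤ a := by omega
  rw [PySem.List.slice_toNat s hr ha]
  have hdt : a.toNat - r.toNat = (a - r).toNat := by omega
  rw [hdt, ← all_spaces_iff_take (s.drop r.toNat) (a - r).toNat]
  have key : (fun j : Nat => PySem.List.pyGet? s (r + (j : Int)) == some ' ')
      = (fun j : Nat => (s.drop r.toNat)[j]? == some ' ') := by
    funext j
    rw [PySem.List.pyGet?_of_nonneg _ (by omega), List.getElem?_drop]
    congr 2
    omega
  rw [key]

lemma loopA_eq_loopB : ∀ (pairs : List (Int × Int)) (s : List Char) (off : Int),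
    loopA pairs s off = loopB pairs s off := by
  intro pairs
  induction pairs with
  | nil => intro s off; rfl
  | cons p rest ih =>
    obtain ⟨curr, ref⟩ := p
    intro s off
    show loopA ((curr, ref) :: rest) s off = loopB ((curr, ref) :: rest) s off
    simp only [loopA, loopB]
    by_cases h0 : ref - (curr + off) = 0
    · rw [if_pos h0, if_neg (by omega), if_neg (by omega), ih,
        show ref - curr = off from by omega]
    · rw [if_neg h0]
      by_cases hpos : 0 < ref - (curr + off)
      · rw [if_pos hpos, if_pos hpos, insRepA_eq_splice, ih,
          show off + (ref - (curr + off)) = ref - curr from by omega]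
      · rw [if_neg hpos, if_neg hpos, if_pos (show ref - (curr + off) < 0 from by omega)]
        rw [show curr + off - -(ref - (curr + off)) = ref from by omega]
        by_cases hneg : ref < 0
        · rw [if_pos (Or.inl hneg), if_pos (Or.inl hneg)]
        · have hiff := all_spaces_iff_slice s ref (curr + off) (by omega) (by omega)
          rw [show curr + off - ref = -(ref - (curr + off)) from by omega] at hiff
          by_cases hall : PySem.List.slice s (some ref) (some (curr + off)) = List.replicate (-(ref - (curr + off))).toNat ' '
          · rw [if_neg (by push_neg; exact ⟨by omega, by rw [hiff]; exact hall⟩),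
                if_neg (by push_neg; exact ⟨by omega, hall⟩)]
            rw [ih, show off + (ref - (curr + off)) = ref - curr from by omega]
          · rw [if_pos (Or.inr (by rw [hiff]; exact hall)), if_pos (Or.inr hall)]

lemma getLastD_cons_helper (x y : Int) (l : List Int) : ((x :: l).getLast?.getD y) = l.getLast?.getD x := by
  cases l with
  | nil => rfl
  | cons z l' => rw [List.getLast?_cons_cons]; rfl

lemma loopB_length : ∀ (pairs : List (Int × Int)) (s : List Char) (delta : Int) (r : List Char),
    loopB pairs s delta = some r →
    (r.length : Int) = s.length + ((pairs.map fun p => p.2 - p.1).getLast?.getD delta) - delta := by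
  intro pairs
  induction pairs with
  | nil => intro s delta r h; cases h; simp
  | cons p rest ih =>
    obtain ⟨curr, ref⟩ := p
    intro s delta r h
    simp only [loopB] at h
    rw [List.map_cons, getLastD_cons_helper]
    by_cases hpos : 0 < ref - (curr + delta)
    · rw [if_pos hpos] at h
      have := ih _ _ _ h
      rw [this]
      have hc := PySem.List.clampIdx_le s.length (curr + delta)
      have hl : ((PySem.List.slice s none (some (curr + delta)) ++ List.replicate (ref - (curr + delta)).toNat ' ' ++ PySem.List.slice s (some (curr + delta)) none).length : Int) = s.length + (ref - curr) - delta := by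
        rw [PySem.List.slice_some_none]
        simp [PySem.List.slice]
        omega
      rw [hl]
      ring
    · rw [if_neg hpos] at h
      by_cases hneg : ref - (curr + delta) < 0
      · rw [if_pos hneg] at h
        by_cases hbad : ref < 0 ∨ PySem.List.slice s (some ref) (some (curr + delta)) ≠ List.replicate (-(ref - (curr + delta))).toNat ' '
        · rw [if_pos hbad] at h; cases h
        · rw [if_neg hbad] at h
          push_neg at hbad
          obtain ⟨href, hsl⟩ := hbad
          have := ih _ _ _ h
          rw [this]
          have hlen := congrArg List.length hsl
          rw [PySem.List.length_slice, List.length_replicate] at hlen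
          have hca := PySem.List.clampIdx_le s.length (curr + delta)
          have hcr := PySem.List.clampIdx_le s.length ref
          have hl : ((PySem.List.slice s none (some ref) ++ PySem.List.slice s (some (curr + delta)) none).length : Int) = s.length + (ref - curr) - delta := by
            rw [PySem.List.slice_some_none]
            simp [PySem.List.slice]
            omega
          rw [hl]
          ring
      · have h0 : ref - (curr + delta) = 0 := by omega
        have hd : ref - curr = delta := by omega
        rw [if_neg hneg] at h
        have := ih _ _ _ h
        rw [this, hd]

-- interior-space indices of r up to position idx, and removal of a set of indices (proof-side)
def SList (r : List Char) (idx : Int) : List Int :=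
  ((PySem.List.enumerate r).filter fun p => p.2 == ' ' && decide (0 < p.1 ∧ p.1 ≤ idx)).map (·.1)

def removeIdxs (r : List Char) (D : List Int) : List Char :=
  ((PySem.List.enumerate r).filter fun p => !(D.contains p.1)).map (·.2)

lemma mem_enum_bounds {r : List Char} {s : Int} {p : Int × Char} (h : p ∈ PySem.List.enumerate r s) :
    s ≤ p.1 ∧ p.1 < s + r.length := by
  obtain ⟨k, hk, rfl⟩ := (PySem.List.mem_enumerate_iff r s p).mp h
  constructor <;> simp <;> omega

lemma enum_decomp (r : List Char) (idx : Nat) (h : idx < r.length) :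
    PySem.List.enumerate r 0 =
      PySem.List.enumerate (r.take idx) 0 ++ ((idx : Int), r[idx]) :: PySem.List.enumerate (r.drop (idx + 1)) ((idx : Int) + 1) := by
  conv_lhs => rw [← List.take_append_drop idx r, List.drop_eq_getElem_cons h]
  rw [PySem.List.enumerate_append, PySem.List.enumerate_cons]
  have hl : ((r.take idx).length : Int) = (idx : Int) := by simp; omega
  rw [hl]
  norm_num

lemma removeIdxs_nil (r : List Char) : removeIdxs r [] = r := by
  unfold removeIdxs
  have : ∀ p ∈ PySem.List.enumerate r 0, (!(List.contains ([] : List Int) p.1)) = true := by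
    intro p _; simp
  rw [List.filter_eq_self.mpr this, PySem.List.map_snd_enumerate]

lemma removeIdxs_congr (r : List Char) (D D' : List Int)
    (h : ∀ i, D.contains i = D'.contains i) : removeIdxs r D = removeIdxs r D' := by
  unfold removeIdxs
  congr 1
  exact List.filter_congr (fun p _ => by rw [h p.1])

lemma mem_SList {r : List Char} {j : Int} : ∀ x ∈ SList r j, 0 < x ∧ x ≤ j := by
  intro x hx
  simp only [SList, List.mem_map, List.mem_filter] at hx
  obtain ⟨p, ⟨_, hcond⟩, rfl⟩ := hx
  simp only [Bool.and_eq_true, decide_eq_true_eq] at hcond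
  exact hcond.2

lemma SList_length_le (r : List Char) (j : Int) : (SList r j).length ≤ r.length := by
  unfold SList
  calc ((((PySem.List.enumerate r).filter fun p => p.2 == ' ' && decide (0 < p.1 ∧ p.1 ≤ j)).map (·.1)).length)
      = (((PySem.List.enumerate r).filter fun p => p.2 == ' ' && decide (0 < p.1 ∧ p.1 ≤ j)).length) := List.length_map ..
    _ ≤ (PySem.List.enumerate r 0).length := List.length_filter_le ..
    _ = r.length := PySem.List.length_enumerate ..

lemma SList_nonpos (r : List Char) (j : Int) (hj : j ≤ 0) : SList r j = [] := by
  unfold SList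
  rw [List.filter_eq_nil_iff.mpr, List.map_nil]
  intro p hp
  simp only [Bool.and_eq_true, decide_eq_true_eq, not_and]
  intro _ h
  omega

lemma removeIdxs_erase (r : List Char) (idx : Nat) (D : List Int)
    (hD : ∀ d ∈ D, d < (idx : Int)) (h : idx < r.length) :
    removeIdxs (r.take idx ++ r.drop (idx + 1)) D = removeIdxs r ((idx : Int) :: D) := by
  unfold removeIdxs
  rw [enum_decomp r idx h, PySem.List.enumerate_append]
  have hl : (0 : Int) + ((r.take idx).length : Int) = (idx : Int) := by simp; omega
  rw [hl]
  rw [List.filter_append, List.filter_append, List.filter_cons]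
  have hmid : (!(List.contains ((idx : Int) :: D) (((idx : Int), r[idx]) : Int × Char).1)) = false := by
    simp
  rw [hmid]
  simp only [if_neg (by simp : ¬ (false = true))]
  have hpre : ∀ p ∈ PySem.List.enumerate (r.take idx) 0,
      (!(List.contains ((idx : Int) :: D) p.1)) = (!(List.contains D p.1)) := by
    intro p hp
    have hb := mem_enum_bounds hp
    have hne : p.1 ≠ (idx : Int) := by
      simp only [List.length_take] at hb
      omega
    simp [List.contains_cons, hne]
  rw [List.filter_congr hpre]
  have hsufD : ∀ p ∈ PySem.List.enumerate (r.drop (idx + 1)) ((idx : Int)),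
      (!(List.contains D p.1)) = true := by
    intro p hp
    have hb := mem_enum_bounds hp
    simp only [Bool.not_eq_true', ← Bool.not_eq_true]
    intro hc
    have := hD p.1 (by simpa [List.contains_iff_mem] using hc)
    omega
  have hsufD' : ∀ p ∈ PySem.List.enumerate (r.drop (idx + 1)) ((idx : Int) + 1),
      (!(List.contains ((idx : Int) :: D) p.1)) = true := by
    intro p hp
    have hb := mem_enum_bounds hp
    simp only [Bool.not_eq_true', ← Bool.not_eq_true]
    intro hc
    rcases (by simpa [List.contains_iff_mem] using hc : p.1 = (idx : Int) ∨ p.1 ∈ D) with h1 | h1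
    · omega
    · have := hD _ h1; omega
  rw [List.filter_eq_self.mpr hsufD, List.filter_eq_self.mpr hsufD']
  simp [PySem.List.map_snd_enumerate]

lemma SList_take_drop (r : List Char) (n : Nat) (h : n + 1 < r.length) (j : Int) (hj : j ≤ (n : Int)) :
    SList (r.take (n + 1) ++ r.drop (n + 2)) j = SList r j := by
  unfold SList
  rw [enum_decomp r (n + 1) h, PySem.List.enumerate_append]
  have hl : (0 : Int) + ((r.take (n + 1)).length : Int) = (((n + 1 : Nat)) : Int) := by
    simp; omega
  rw [hl]
  rw [List.filter_append, List.filter_append, List.filter_cons]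
  have hmid : ((((((n + 1 : Nat)) : Int), r[n + 1]) : Int × Char).2 == ' '
      && decide (0 < (((((n + 1 : Nat)) : Int), r[n + 1]) : Int × Char).1 ∧ (((((n + 1 : Nat)) : Int), r[n + 1]) : Int × Char).1 ≤ j)) = false := by
    simp only [Bool.and_eq_false_iff]
    right
    simp only [decide_eq_false_iff_not, not_and]
    intro _
    push_cast
    omega
  rw [hmid]
  simp only [if_neg (by simp : ¬ (false = true))]
  have hsuf1 : ((PySem.List.enumerate (r.drop (n + 2)) (((n + 1 : Nat)) : Int)).filter
      fun p => p.2 == ' ' && decide (0 < p.1 ∧ p.1 ≤ j)) = [] := by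
    rw [List.filter_eq_nil_iff]
    intro p hp
    have hb := mem_enum_bounds hp
    simp only [Bool.and_eq_true, decide_eq_true_eq, not_and]
    intro _ hc
    push_cast at hb
    omega
  have hsuf2 : ((PySem.List.enumerate (r.drop (n + 1 + 1)) ((((n + 1 : Nat)) : Int) + 1)).filter
      fun p => p.2 == ' ' && decide (0 < p.1 ∧ p.1 ≤ j)) = [] := by
    rw [List.filter_eq_nil_iff]
    intro p hp
    have hb := mem_enum_bounds hp
    simp only [Bool.and_eq_true, decide_eq_true_eq, not_and]
    intro _ hc
    push_cast at hb
    omega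
  rw [show n + 1 + 1 = n + 2 from rfl] at hsuf2
  rw [hsuf1, hsuf2]

lemma SList_succ (r : List Char) (n : Nat) (h : n + 1 < r.length) :
    SList r (((n + 1 : Nat)) : Int) =
      if r[n + 1] = ' ' then SList r (n : Int) ++ [(((n + 1 : Nat)) : Int)] else SList r (n : Int) := by
  unfold SList
  rw [enum_decomp r (n + 1) h]
  rw [List.filter_append, List.filter_append, List.filter_cons, List.filter_cons]
  have hpre : ∀ p ∈ PySem.List.enumerate (r.take (n + 1)) 0,
      (p.2 == ' ' && decide (0 < p.1 ∧ p.1 ≤ (((n + 1 : Nat)) : Int)))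
        = (p.2 == ' ' && decide (0 < p.1 ∧ p.1 ≤ (n : Int))) := by
    intro p hp
    have hb := mem_enum_bounds hp
    simp only [List.length_take] at hb
    congr 1
    apply decide_eq_decide.mpr
    constructor <;> intro hx <;> refine ⟨hx.1, by push_cast at *; omega⟩
  rw [List.filter_congr hpre]
  have hsuf : ∀ (j : Int), j ≤ (((n + 1 : Nat)) : Int) → ((PySem.List.enumerate (r.drop (n + 1 + 1)) ((((n + 1 : Nat)) : Int) + 1)).filter
      fun p => p.2 == ' ' && decide (0 < p.1 ∧ p.1 ≤ j)) = [] := by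
    intro j hj
    rw [List.filter_eq_nil_iff]
    intro p hp
    have hb := mem_enum_bounds hp
    simp only [Bool.and_eq_true, decide_eq_true_eq, not_and]
    intro _ hc
    omega
  rw [hsuf _ le_rfl, hsuf _ (by push_cast; omega)]
  by_cases hsp : r[n + 1] = ' '
  · rw [if_pos hsp]
    have hmid : ((((((n + 1 : Nat)) : Int), r[n + 1]) : Int × Char).2 == ' '
        && decide (0 < ((((n + 1 : Nat)) : Int)) ∧ ((((n + 1 : Nat)) : Int)) ≤ ((((n + 1 : Nat)) : Int)))) = true := by
      simp only [hsp, beq_self_eq_true, Bool.true_and, decide_eq_true_eq]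
      push_cast
      omega
    rw [hmid]
    simp
  · rw [if_neg hsp]
    have hmid : ((((((n + 1 : Nat)) : Int), r[n + 1]) : Int × Char).2 == ' '
        && decide (0 < ((((n + 1 : Nat)) : Int)) ∧ ((((n + 1 : Nat)) : Int)) ≤ ((((n + 1 : Nat)) : Int)))) = false := by
      simp [hsp]
    rw [hmid]
    simp

lemma trimA_spec : ∀ (idx : Nat) (r : List Char) (e : Nat), idx + 2 ≤ r.length →
    trimA r (e : Int) (idx : Int) =
      (removeIdxs r ((SList r idx).drop ((SList r idx).length - min e (SList r idx).length)),
        (e : Int) - (min e (SList r idx).length : Nat)) ∧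
    (removeIdxs r ((SList r idx).drop ((SList r idx).length - min e (SList r idx).length))).length
      = r.length - min e (SList r idx).length := by
  intro idx
  induction idx with
  | zero =>
    intro r e hlen
    rw [show ((0 : Nat) : Int) = 0 from rfl, SList_nonpos r 0 le_rfl]
    have hmin : min e ([] : List Int).length = 0 := by simp
    rw [hmin]
    simp only [Nat.sub_zero, List.drop_nil]
    rw [removeIdxs_nil, trimA]
    constructor
    · rw [dif_neg (by omega)]
      simp
    · omega
  | succ n ih =>
    intro r e hlen
    have hn1 : n + 1 < r.length := by omega
    rcases e with _ | e'
    · rw [trimA, dif_neg (by norm_num)]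
      have h0 : min 0 (SList r ((n + 1 : Nat) : Int)).length = 0 := Nat.zero_min _
      rw [h0]
      simp only [Nat.sub_zero, List.drop_length]
      rw [removeIdxs_nil]
      constructor
      · simp
      · omega
    · rw [trimA, dif_pos (by constructor <;> push_cast <;> omega)]
      have hget : PySem.List.pyGet? r ((n + 1 : Nat) : Int) = some r[n + 1] := by
        rw [PySem.List.pyGet?_natCast]
        exact List.getElem?_eq_getElem hn1
      rw [hget]
      have harg1 : ((e' + 1 : Nat) : Int) - 1 = ((e' : Nat) : Int) := by push_cast; ring
      have harg2 : ((n + 1 : Nat) : Int) - 1 = ((n : Nat) : Int) := by push_cast; ring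
      by_cases hsp : r[n + 1] = ' '
      · rw [if_pos (by simp [hsp])]
        have hs1 : PySem.List.slice r none (some ((n + 1 : Nat) : Int)) = r.take (n + 1) :=
          PySem.List.slice_to_natCast ..
        have hs2 : PySem.List.slice r (some (((n + 1 : Nat) : Int) + 1)) none = r.drop (n + 2) := by
          rw [show (((n + 1 : Nat) : Int) + 1) = ((n + 2 : Nat) : Int) from by omega,
            PySem.List.slice_from_natCast]
        rw [hs1, hs2, harg1, harg2]
        set r' := r.take (n + 1) ++ r.drop (n + 2) with hr'
        have hr'len : r'.length = r.length - 1 := by rw [hr']; simp; omega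
        have hS' : SList r' (n : Int) = SList r (n : Int) := SList_take_drop r n hn1 (n : Int) le_rfl
        obtain ⟨heq, hlen'⟩ := ih r' e' (by omega)
        rw [hS'] at heq hlen'
        rw [heq]
        have hS : SList r ((n + 1 : Nat) : Int) = SList r (n : Int) ++ [((n + 1 : Nat) : Int)] := by
          rw [SList_succ r n hn1, if_pos hsp]
        rw [hS]
        set S0 := SList r (n : Int) with hS0def
        set m' := min e' S0.length with hm'def
        have hm : min (e' + 1) (S0 ++ [((n + 1 : Nat) : Int)]).length = m' + 1 := by
          simp only [List.length_append, List.length_cons, List.length_nil]; omega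
        rw [hm]
        have hdrop : (S0 ++ [((n + 1 : Nat) : Int)]).drop ((S0 ++ [((n + 1 : Nat) : Int)]).length - (m' + 1))
            = S0.drop (S0.length - m') ++ [((n + 1 : Nat) : Int)] := by
          simp only [List.length_append, List.length_cons, List.length_nil]
          rw [List.drop_append_of_le_length (by omega)]
          congr 2
          omega
        rw [hdrop]
        have hDlt : ∀ d ∈ S0.drop (S0.length - m'), d < ((n + 1 : Nat) : Int) := by
          intro d hd
          have hb := mem_SList _ (List.mem_of_mem_drop hd)
          push_cast
          omega
        have herase := removeIdxs_erase r (n + 1) (S0.drop (S0.length - m')) hDlt hn1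
        rw [show n + 1 + 1 = n + 2 from rfl, ← hr'] at herase
        have hcongr : removeIdxs r (((n + 1 : Nat) : Int) :: S0.drop (S0.length - m'))
            = removeIdxs r (S0.drop (S0.length - m') ++ [((n + 1 : Nat) : Int)]) := by
          apply removeIdxs_congr
          intro i
          simp [List.contains_cons, List.contains_append, Bool.or_comm]
        constructor
        · rw [herase, hcongr]
          congr 1
          push_cast
          ring
        · rw [← hcongr, ← herase, hlen']
          omega
      · rw [if_neg (by simp [hsp])]
        rw [harg2]
        obtain ⟨heq, hlen'⟩ := ih r (e' + 1) (by omega)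
        have hS : SList r ((n + 1 : Nat) : Int) = SList r (n : Int) := by
          rw [SList_succ r n hn1, if_neg hsp]
        rw [hS, heq]
        exact ⟨rfl, hlen'⟩

lemma contains_ofList (D : List Int) (i : Int) :
    List.contains (PySem.Set.ofList D) i = D.contains i := by
  rw [Bool.eq_iff_iff]
  simp only [List.contains_iff_mem]
  exact PySem.Set.mem_ofList D i

lemma drop_last_singleton (s : List Char) (h : s ≠ []) : s.drop (s.length - 1) = [s.getLast h] := by
  conv_lhs => rw [← List.dropLast_append_getLast h]
  rw [show (s.dropLast ++ [s.getLast h]).length - 1 = s.dropLast.length from by simp]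
  exact List.drop_left

-- ===== VERDICT (by name: the statement is the Claim_ definition above) =====
theorem fix_line_space_spec : Claim_equal_fix_line_space := by
  unfold Claim_equal_fix_line_space
  intro line curr_pos ref_pos target_len _hDom hPre
  unfold Spec_fix_line_space fix_line_space fix_line_space_alt
  by_cases hlen : curr_pos.length ≠ ref_pos.length
  · rw [if_pos hlen, if_pos hlen]
  · rw [if_neg hlen, if_neg hlen, loopA_eq_loopB]
    have hleq : curr_pos.length = ref_pos.length := by omega
    cases hloop : loopB (curr_pos.zip ref_pos) line.toList 0 with
    | none => rfl
    | some s =>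
      simp only []
      have hL := loopB_length _ _ _ _ hloop
      rw [sub_zero] at hL
      by_cases hlt : (s.length : Int) < target_len
      · rw [if_pos hlt, if_pos hlt]
        have hne : s ≠ [] := by
          intro hnil
          have h2 := (hPre hleq).2
          apply h2
          subst hnil
          simp only [List.length_nil, Nat.cast_zero] at hL
          refine ⟨by omega, ?_⟩
          unfold preDeltas
          omega
        have hget : PySem.List.pyGet? s (-1) = some (s.getLast hne) := by
          rw [PySem.List.pyGet?_neg_one, List.getLast?_eq_getLast]
        rw [hget, Option.map_some]
        have hdl : PySem.List.slice s none (some (-1)) = s.dropLast := PySem.List.slice_to_neg_one ..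
        have hfrom : PySem.List.slice s (some (-1)) none = [s.getLast hne] := by
          rw [PySem.List.slice_from_neg_one]
          exact drop_last_singleton s hne
        rw [hdl, hfrom]
        simp only [Option.bind]
        have hpos : 0 < s.length := List.length_pos_iff.mpr hne
        rw [if_pos (show ((s.dropLast ++ List.replicate (target_len - (s.length : Int)).toNat ' ' ++ [s.getLast hne]).length : Int) = target_len from by
          simp only [List.length_append, List.length_dropLast, List.length_replicate, List.length_cons, List.length_nil]
          push_cast
          omega)]
      · by_cases htgt : target_len < (s.length : Int)
        · rw [if_neg hlt, if_neg hlt, if_pos htgt, if_pos htgt]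
          by_cases hsmall : s.length ≤ 1
          · rw [trimA, dif_neg (by push_cast; omega)]
            have hsp : ((PySem.List.enumerate s).filter fun p => p.2 == ' ' && decide (0 < p.1 ∧ p.1 < (s.length : Int) - 1)) = [] := by
              rw [List.filter_eq_nil_iff]
              intro p hp
              have hb := mem_enum_bounds hp
              simp only [Bool.and_eq_true, decide_eq_true_eq, not_and]
              intro _ h1
              omega
            rw [hsp]
            rw [if_pos (show (0:Int) < ((s, (s.length : Int) - target_len).2) from by simp; omega)]
            rw [if_pos (show ((([] : List (Int × Char)).map (fun p => p.1)).length < ((s.length : Int) - target_len).toNat) from by simp; omega)]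
            simp only [Option.bind]
          · have h2le : 2 ≤ s.length := by omega
            set e := ((s.length : Int) - target_len).toNat with he
            set nn := s.length - 2 with hnn
            obtain ⟨heq, hlenq⟩ := trimA_spec nn s e (by omega)
            have harg1 : (s.length : Int) - target_len = ((e : Nat) : Int) := by omega
            have harg2 : (s.length : Int) - 2 = ((nn : Nat) : Int) := by omega
            rw [harg1, harg2, heq]
            set S := SList s ((nn : Nat) : Int) with hSdef
            set m := min e S.length with hm
            have hSsp : ((PySem.List.enumerate s).filter fun p => p.2 == ' ' && decide (0 < p.1 ∧ p.1 < (s.length : Int) - 1)).map (·.1) = S := by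
              rw [hSdef]
              unfold SList
              congr 1
              apply List.filter_congr
              intro p _
              congr 1
              apply decide_eq_decide.mpr
              constructor <;> intro hx <;> exact ⟨hx.1, by omega⟩
            rw [hSsp]
            have hSle := SList_length_le s ((nn : Nat) : Int)
            rw [← hSdef] at hSle
            by_cases hfew : S.length < e
            · rw [if_pos (show (0:Int) < (removeIdxs s (S.drop (S.length - m)), ((e : Nat) : Int) - ((m : Nat) : Int)).2 from by simp; omega)]
              rw [if_pos hfew]
              simp only [Option.bind]
            · rw [if_neg (show ¬ (0:Int) < (removeIdxs s (S.drop (S.length - m)), ((e : Nat) : Int) - ((m : Nat) : Int)).2 from by simp; omega)]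
              rw [if_neg hfew]
              simp only [Option.bind]
              have hme : m = e := by omega
              rw [if_pos (show ((removeIdxs s (S.drop (S.length - m))).length : Int) = target_len from by rw [hlenq]; push_cast; omega)]
              have hDcont : ∀ p : Int × Char,
                  (!(PySem.Set.contains (PySem.Set.ofList (S.drop (S.length - e))) p.1)) = (!((S.drop (S.length - m)).contains p.1)) := by
                intro p
                rw [hme]
                show (!(List.contains (PySem.Set.ofList (S.drop (S.length - e))) p.1)) = _
                rw [contains_ofList]
              congr 1
              apply congrArg
              show removeIdxs s (S.drop (S.length - m)) = (((PySem.List.enumerate s).filter fun p => !(PySem.Set.contains (PySem.Set.ofList (S.drop (S.length - e))) p.1)).map (·.2))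
              unfold removeIdxs
              congr 1
              exact (List.filter_congr (fun p _ => hDcont p)).symm
        · rw [if_neg hlt, if_neg hlt, if_neg htgt, if_neg htgt]
          simp only [Option.bind]
          rw [if_pos (show ((s.length : Int)) = target_len from by omega)]
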